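-- pv_equiv track=rewrite | github.com/AfrasiyabManzoor/LongestNonRepeatedSubArray | LongestNonRepeatedSubArrayCount.py | countLongestArray
-- ===== SOURCE A (Python) =====
-- def countLongestArray(string,index):
--     dictionary = {}
--     length = len(string)
--     i = index
--     while i < length and not isPresent(string[i], dictionary):
--         dictionary[string[i]] = string[i]
--         i += 1
--     return i - index
--
-- def isPresent(key,dictionary):
--     if dictionary.get(key) == None:
--         return False
--     return True
-- ===== SOURCE B (Python) =====
-- def countLongestArray(string, index):
--     # The run ends at the earliest position that is a *second* occurrence of some
--     # character at/after `index`.  Compute, for every position p, where its character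
--     # next reappears (str.find with a start), and take the minimum such position.
--     n = len(string)
--     if index >= n:
--         return 0
--     stop = n
--     for p in range(index, n):
--         q = string.find(string[p], p + 1)
--         if 0 <= q < stop:
--             stop = q
--     return stop - index
-- ===== Notes on version B (the rewrite author's own statement) =====
-- stated objective: alternative
-- what changed: B replaces A's forward walk with a maintained seen-dictionary by a global minimum computation: for every position p it asks str.find where s[p] next reappears and takes the minimum such second-occurrence position; no scan state is carried and the loop never terminates early.
-- outside the precondition, e.g. on countLongestArray('caca', -3): A returns 2, B returns 4; on countLongestArray('ab', -5): A raises IndexError, B raises IndexError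
import Mathlib
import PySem

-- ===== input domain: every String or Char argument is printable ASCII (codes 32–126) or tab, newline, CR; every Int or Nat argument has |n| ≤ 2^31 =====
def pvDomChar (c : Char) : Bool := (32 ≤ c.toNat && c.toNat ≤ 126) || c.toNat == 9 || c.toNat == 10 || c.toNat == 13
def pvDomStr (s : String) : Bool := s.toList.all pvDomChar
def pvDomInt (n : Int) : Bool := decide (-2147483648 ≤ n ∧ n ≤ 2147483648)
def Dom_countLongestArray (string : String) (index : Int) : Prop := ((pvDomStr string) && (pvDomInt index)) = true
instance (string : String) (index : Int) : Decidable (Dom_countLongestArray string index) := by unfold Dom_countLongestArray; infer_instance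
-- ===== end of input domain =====

-- B replaces A's forward walk with a seen-dictionary by a global minimum over next-occurrence
-- positions computed with str.find (alternative algorithm, no maintained scan state).

-- ===== PORT A =====
def pvIsPresent (key : Char) (d : PySem.Dict Char Char) : Bool :=
  match d.get? key with
  | none => false
  | some _ => true

-- A's while loop; returns the final i. 'none' from pyGet? = IndexError in Python (excluded by Pre_).
def pvALoop (s : List Char) (length : Int) (d : PySem.Dict Char Char) (i : Int) : Int :=
  if i < length then
    match PySem.List.pyGet? s i with
    | none => i
    | some c =>
      if pvIsPresent c d then i
      else pvALoop s length (d.insert c c) (i + 1)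
  else i
termination_by (length - i).toNat
decreasing_by omega

def countLongestArray (string : String) (index : Int) : Int :=
  let s := string.toList
  let length : Int := s.length
  (pvALoop s length PySem.Dict.empty index) - index

-- ===== PORT B =====
-- the body of Source B's for-loop: q = string.find(string[p], p+1); if 0 <= q < stop: stop = q
def pvStepB (string : String) (stop p : Int) : Int :=
  match PySem.List.pyGet? string.toList p with
  | none => stop   -- string[p] raises in Python (unreachable inside Pre_)
  | some c =>
    let q := PySem.Str.findFrom string (String.ofList [c]) (p + 1) none
    if 0 ≤ q ∧ q < stop then q else stop

def countLongestArray_alt (string : String) (index : Int) : Int :=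
  let n : Int := string.toList.length
  if n ≤ index then 0
  else ((PySem.List.pyRange index n 1).foldl (pvStepB string) n) - index

-- ===== PRECONDITION & SPEC =====
-- Pre_ excludes negative index: there A raises IndexError when index < -len(string), and for
-- -len ≤ index < 0 both A's and B's values arise only from Python's accidental negative-index
-- wraparound/slicing on an input no caller would specify — neither value is the function's meaning.
def Pre_countLongestArray (string : String) (index : Int) : Prop := 0 ≤ index
instance (string : String) (index : Int) : Decidable (Pre_countLongestArray string index) := by unfold Pre_countLongestArray; infer_instance

def pvWitness_countLongestArray : String × Int := ("abcab", 1)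

def Spec_countLongestArray (string : String) (index : Int) (out : Int) : Prop := out = countLongestArray_alt string index
instance (string : String) (index : Int) (out : Int) : Decidable (Spec_countLongestArray string index out) := by unfold Spec_countLongestArray; infer_instance

-- ===== CLAIM (what is proved, stated in full; the proofs are below) =====
def Claim_equal_countLongestArray : Prop := ∀ (string : String) (index : Int), Dom_countLongestArray string index → Pre_countLongestArray string index → Spec_countLongestArray string index (countLongestArray string index)

-- ===== LEMMAS AND PROOFS =====

-- Reference scan (proof-only): walk i forward while s[i] is not in the consumed slice s[index:i].
def pvScan (s : List Char) (index : Int) (i : Int) : Int :=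
  if i < (s.length : Int) then
    match PySem.List.pyGet? s i with
    | none => i
    | some c =>
      if c ∈ PySem.List.slice s (some index) (some i) then i
      else pvScan s index (i + 1)
  else i
termination_by ((s.length : Int) - i).toNat
decreasing_by omega

-- A's dictionary after processing s[index:i] contains exactly the chars of that slice;
-- under this invariant A's loop and the reference scan return the same final i.
theorem pvLoop_eq (s : List Char) (index : Int) :
    ∀ (n : Nat) (i : Int) (d : PySem.Dict Char Char),
      ((s.length : Int) - i).toNat = n → 0 ≤ index → index ≤ i →
      (∀ c, pvIsPresent c d = true ↔ c ∈ PySem.List.slice s (some index) (some i)) →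
      pvALoop s (s.length) d i = pvScan s index i := by
  intro n
  induction n with
  | zero =>
    intro i d hn h0 hii hinv
    rw [pvALoop, pvScan]
    have : ¬ i < (s.length : Int) := by omega
    simp [this]
  | succ m ih =>
    intro i d hn h0 hii hinv
    rw [pvALoop, pvScan]
    by_cases hlt : i < (s.length : Int)
    · simp only [hlt, if_true]
      have h0i : 0 ≤ i := le_trans h0 hii
      have hget : PySem.List.pyGet? s i = s[i.toNat]? := PySem.List.pyGet?_of_nonneg s h0i
      have hidx : i.toNat < s.length := by omega
      rw [hget, List.getElem?_eq_getElem hidx]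
      set c := s[i.toNat] with hc
      by_cases hmem : c ∈ PySem.List.slice s (some index) (some i)
      · have : pvIsPresent c d = true := (hinv c).mpr hmem
        simp [this, hmem]
      · have hnp : pvIsPresent c d = false := by
          rcases Bool.eq_false_or_eq_true (pvIsPresent c d) with h | h
          · exact absurd ((hinv c).mp h) hmem
          · exact h
        simp only [hnp, Bool.false_eq_true, if_false, hmem, if_false]
        apply ih
        · omega
        · exact h0
        · omega
        · intro c'
          have hslice : PySem.List.slice s (some index) (some (i + 1))
              = PySem.List.slice s (some index) (some i) ++ [c] := by
            rw [PySem.List.slice_toNat s h0 h0i,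
                PySem.List.slice_toNat s h0 (by omega : (0:Int) ≤ i + 1)]
            have h1 : (i + 1).toNat = i.toNat + 1 := by omega
            have h2 : index.toNat ≤ i.toNat := by omega
            rw [h1]
            have h3 : i.toNat + 1 - index.toNat = (i.toNat - index.toNat) + 1 := by omega
            rw [h3, List.take_add_one]
            congr 1
            have h4 : (s.drop index.toNat)[i.toNat - index.toNat]? = some c := by
              rw [List.getElem?_drop]
              have h5 : index.toNat + (i.toNat - index.toNat) = i.toNat := by omega
              rw [h5, List.getElem?_eq_getElem hidx]
            simp [h4]
          rw [hslice]
          constructor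
          · intro h
            unfold pvIsPresent at h
            rw [PySem.Dict.get?_insert] at h
            by_cases hce : c' = c
            · simp [hce]
            · simp only [hce, if_false] at h
              have : pvIsPresent c' d = true := by unfold pvIsPresent; exact h
              simp [List.mem_append, (hinv c').mp this]
          · intro h
            unfold pvIsPresent
            rw [PySem.Dict.get?_insert]
            rcases List.mem_append.mp h with h | h
            · by_cases hce : c' = c
              · simp [hce]
              · have hp : pvIsPresent c' d = true := (hinv c').mpr h
                unfold pvIsPresent at hp
                simp only [hce, if_false]
                exact hp
            · simp at h
              simp [h]
    · simp [hlt]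

theorem pvSlice_self_empty (s : List Char) (index : Int) (h0 : 0 ≤ index) :
    PySem.List.slice s (some index) (some index) = [] := by
  rw [PySem.List.slice_toNat s h0 h0]
  simp

-- position j is a repeat of some earlier position p ∈ [k, j)
def pvRepAt (l : List Char) (k j : Nat) : Prop := ∃ p : Nat, k ≤ p ∧ p < j ∧ l[p]? = l[j]?

theorem pvSingleton_prefix_drop (l : List Char) (c : Char) (i : Nat) :
    [c] <+: l.drop i ↔ l[i]? = some c := by
  rw [← List.head?_drop]
  constructor
  · rintro ⟨t, ht⟩
    rw [← ht]
    rfl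
  · intro h
    cases hd : l.drop i with
    | nil => rw [hd] at h; exact absurd h (by simp)
    | cons a t =>
      rw [hd] at h
      simp only [List.head?_cons, Option.some.injEq] at h
      exact ⟨t, by simp [hd, h]⟩

theorem pvMem_slice_iff (l : List Char) (k i : Int) (c : Char)
    (h0 : 0 ≤ k) (hki : k ≤ i) :
    c ∈ PySem.List.slice l (some k) (some i) ↔
      ∃ p : Nat, k.toNat ≤ p ∧ p < i.toNat ∧ l[p]? = some c := by
  rw [PySem.List.slice_toNat l h0 (by omega : (0:Int) ≤ i)]
  rw [List.mem_iff_getElem?]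
  constructor
  · rintro ⟨m, hm⟩
    rw [List.getElem?_take] at hm
    rcases Nat.lt_or_ge m (i.toNat - k.toNat) with hmb | hmb
    · rw [if_pos hmb, List.getElem?_drop] at hm
      exact ⟨k.toNat + m, by omega, by omega, hm⟩
    · rw [if_neg (by omega)] at hm
      simp at hm
  · rintro ⟨p, hkp, hpi, hp⟩
    refine ⟨p - k.toNat, ?_⟩
    rw [List.getElem?_take]
    have : p - k.toNat < i.toNat - k.toNat := by omega
    rw [if_pos this, List.getElem?_drop]
    have : k.toNat + (p - k.toNat) = p := by omega
    rw [this]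
    exact hp

-- characterization of the reference scan: result r satisfies i ≤ r ≤ n, no repeat in [i, r), repeat at r if r < n
theorem pvScan_spec (l : List Char) (k : Int) (h0 : 0 ≤ k) :
    ∀ (N : Nat) (i : Int), ((l.length : Int) - i).toNat = N → k ≤ i → i ≤ (l.length : Int) →
      i ≤ pvScan l k i ∧ pvScan l k i ≤ (l.length : Int) ∧
      (∀ j : Int, i ≤ j → j < pvScan l k i → ¬ pvRepAt l k.toNat j.toNat) ∧
      (pvScan l k i < (l.length : Int) → pvRepAt l k.toNat (pvScan l k i).toNat) := by
  intro N
  induction N with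
  | zero =>
    intro i hN hki hin
    have hi : i = (l.length : Int) := by omega
    rw [pvScan]
    simp only [hi, lt_irrefl, if_false]
    exact ⟨le_refl _, le_refl _, fun j h1 h2 => absurd (lt_of_le_of_lt h1 h2) (lt_irrefl _), fun h => h.elim⟩
  | succ m ih =>
    intro i hN hki hin
    rw [pvScan]
    by_cases hlt : i < (l.length : Int)
    · simp only [hlt, if_true]
      have h0i : 0 ≤ i := le_trans h0 hki
      have hidx : i.toNat < l.length := by omega
      rw [PySem.List.pyGet?_of_nonneg l h0i, List.getElem?_eq_getElem hidx]
      set c := l[i.toNat] with hc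
      by_cases hmem : c ∈ PySem.List.slice l (some k) (some i)
      · simp only [hmem, if_true]
        refine ⟨le_refl _, by omega, fun j h1 h2 => absurd (lt_of_le_of_lt h1 h2) (lt_irrefl _), fun _ => ?_⟩
        obtain ⟨p, hp1, hp2, hp3⟩ := (pvMem_slice_iff l k i c h0 hki).mp hmem
        exact ⟨p, hp1, hp2, by rw [hp3, List.getElem?_eq_getElem hidx]⟩
      · simp only [hmem, if_false]
        obtain ⟨hA, hB, hC, hD⟩ := ih (i + 1) (by omega) (by omega) (by omega)
        refine ⟨by omega, hB, ?_, hD⟩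
        intro j h1 h2
        by_cases hji : j = i
        · subst hji
          intro ⟨p, hp1, hp2, hp3⟩
          apply hmem
          apply (pvMem_slice_iff l k j c h0 hki).mpr
          exact ⟨p, hp1, hp2, by rw [hp3, List.getElem?_eq_getElem hidx]⟩
        · exact hC j (by omega) h2
    · simp only [hlt, if_false]
      exact ⟨le_refl _, by omega, fun j h1 h2 => absurd (lt_of_le_of_lt h1 h2) (lt_irrefl _), fun h => h.elim⟩

-- the candidate written by Source B's loop body at position p: where string[p] next occurs, or -1
def pvCand (string : String) (p : Int) : Int :=
  match PySem.List.pyGet? string.toList p with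
  | none => -1
  | some c => PySem.Str.findFrom string (String.ofList [c]) (p + 1) none

theorem pvStepB_eq (string : String) (stop p : Int) :
    pvStepB string stop p =
      if 0 ≤ pvCand string p ∧ pvCand string p < stop then pvCand string p else stop := by
  unfold pvStepB pvCand
  cases PySem.List.pyGet? string.toList p with
  | none => simp
  | some c => rfl

theorem pvFold_le_init (string : String) (n : Int) :
    ∀ (N : Nat) (a acc : Int), (n - a).toNat = N →
      (PySem.List.pyRange a n 1).foldl (pvStepB string) acc ≤ acc := by
  intro N
  induction N with
  | zero =>
    intro a acc hN
    rw [PySem.List.pyRange_one_eq_nil (by omega)]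
    simp
  | succ m ih =>
    intro a acc hN
    by_cases hab : a < n
    · rw [PySem.List.pyRange_one_cons hab]
      simp only [List.foldl_cons]
      have h1 := ih (a + 1) (pvStepB string acc a) (by omega)
      have h2 : pvStepB string acc a ≤ acc := by
        rw [pvStepB_eq]
        split_ifs with h
        · omega
        · exact le_refl _
      omega
    · rw [PySem.List.pyRange_one_eq_nil (by omega)]
      simp

theorem pvFold_le_cand (string : String) (n : Int) :
    ∀ (N : Nat) (a acc p : Int), (n - a).toNat = N → a ≤ p → p < n → 0 ≤ pvCand string p →
      (PySem.List.pyRange a n 1).foldl (pvStepB string) acc ≤ pvCand string p := by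
  intro N
  induction N with
  | zero => intro a acc p hN h1 h2 _; omega
  | succ m ih =>
    intro a acc p hN h1 h2 hc
    rw [PySem.List.pyRange_one_cons (by omega)]
    simp only [List.foldl_cons]
    by_cases hap : a = p
    · subst hap
      have hle := pvFold_le_init string n (n - (a+1)).toNat (a + 1) (pvStepB string acc a) rfl
      have hstep : pvStepB string acc a ≤ pvCand string a := by
        rw [pvStepB_eq]
        split_ifs with h
        · exact le_refl _
        · push_neg at h
          omega
      omega
    · exact ih (a + 1) _ p (by omega) (by omega) h2 hc

theorem pvFold_ge (string : String) (n r a0 : Int)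
    (hcand : ∀ p : Int, a0 ≤ p → p < n → 0 ≤ pvCand string p → r ≤ pvCand string p) :
    ∀ (N : Nat) (a acc : Int), (n - a).toNat = N → a0 ≤ a → r ≤ acc →
      r ≤ (PySem.List.pyRange a n 1).foldl (pvStepB string) acc := by
  intro N
  induction N with
  | zero =>
    intro a acc hN ha0 hr
    rw [PySem.List.pyRange_one_eq_nil (by omega)]
    simpa using hr
  | succ m ih =>
    intro a acc hN ha0 hr
    by_cases hab : a < n
    · rw [PySem.List.pyRange_one_cons hab]
      simp only [List.foldl_cons]
      apply ih (a + 1) _ (by omega) (by omega)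
      rw [pvStepB_eq]
      split_ifs with h
      · exact hcand a ha0 hab h.1
      · exact hr
    · rw [PySem.List.pyRange_one_eq_nil (by omega)]
      simpa using hr

-- single-character find: the characterization we need of pvCand at a valid position p
theorem pvCand_spec (string : String) (p : Int) (h0 : 0 ≤ p) (hp : p.toNat < string.toList.length) :
    (0 ≤ pvCand string p →
      p + 1 ≤ pvCand string p ∧ (pvCand string p).toNat < string.toList.length ∧
      string.toList[(pvCand string p).toNat]? = string.toList[p.toNat]? ∧
      ∀ i : Nat, p.toNat + 1 ≤ i → i < (pvCand string p).toNat → string.toList[i]? ≠ string.toList[p.toNat]?) ∧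
    (∀ j : Nat, p.toNat + 1 ≤ j → string.toList[j]? = string.toList[p.toNat]? →
      0 ≤ pvCand string p ∧ (pvCand string p).toNat ≤ j) := by
  set l := string.toList with hl
  have hc : PySem.List.pyGet? l p = some l[p.toNat] := by
    rw [PySem.List.pyGet?_of_nonneg l h0, List.getElem?_eq_getElem hp]
  set c := l[p.toNat] with hcc
  have hq : pvCand string p = PySem.Chars.findFrom l [c] ((p.toNat + 1 : Nat) : Int) none := by
    unfold pvCand
    rw [← hl, hc]
    simp only
    rw [PySem.Str.findFrom_eq]
    have : (String.ofList [c]).toList = [c] := by simp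
    rw [← hl, this]
    congr 1
    omega
  have hk1 : p.toNat + 1 ≤ l.length := by omega
  constructor
  · intro hpos
    have hne : PySem.Chars.findFrom l [c] ((p.toNat + 1 : Nat) : Int) none ≠ -1 := by
      rw [← hq]; omega
    obtain ⟨hge, hpre, hmin⟩ := PySem.Chars.findFrom_natCast_spec l [c] (p.toNat + 1) hk1 hne
    rw [← hq] at hge hpre hmin
    have hmem := (pvSingleton_prefix_drop l c (pvCand string p).toNat).mp hpre
    have hlen : (pvCand string p).toNat < l.length := by
      by_contra hgt
      rw [List.getElem?_eq_none (by omega)] at hmem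
      simp at hmem
    refine ⟨by omega, hlen, ?_, ?_⟩
    · rw [hmem, List.getElem?_eq_getElem hp]
    · intro i hi1 hi2 heq
      apply hmin i hi1 hi2
      apply (pvSingleton_prefix_drop l c i).mpr
      rw [heq, List.getElem?_eq_getElem hp]
  · intro j hj1 hj2
    have hinf : [c] <:+: l.drop (p.toNat + 1) := by
      have hjm : c ∈ l.drop (p.toNat + 1) := by
        rw [List.getElem?_eq_getElem hp] at hj2
        have hjl : j < l.length := by
          by_contra hh
          rw [List.getElem?_eq_none (by omega)] at hj2
          simp at hj2
        rw [List.getElem?_eq_getElem hjl] at hj2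
        have : l[j] ∈ l.drop (p.toNat + 1) := by
          rw [List.mem_iff_getElem?]
          refine ⟨j - (p.toNat + 1), ?_⟩
          rw [List.getElem?_drop]
          have hidx2 : p.toNat + 1 + (j - (p.toNat + 1)) = j := by omega
          rw [hidx2, List.getElem?_eq_getElem hjl]
        rw [Option.some.inj hj2] at this
        exact this
      obtain ⟨s1, t1, hst⟩ := List.append_of_mem hjm
      exact ⟨s1, t1, by rw [hst]; simp⟩
    have hne : PySem.Chars.findFrom l [c] ((p.toNat + 1 : Nat) : Int) none ≠ -1 := by
      rw [ne_eq, PySem.Chars.findFrom_natCast_eq_neg_one_iff l [c] (p.toNat + 1) hk1]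
      simpa using hinf
    obtain ⟨hge, _, hmin⟩ := PySem.Chars.findFrom_natCast_spec l [c] (p.toNat + 1) hk1 hne
    rw [← hq] at hge hmin
    have hpos : 0 ≤ pvCand string p := by omega
    refine ⟨hpos, ?_⟩
    by_contra hgt
    push_neg at hgt
    apply hmin j hj1 hgt
    apply (pvSingleton_prefix_drop l c j).mpr
    rw [hj2, List.getElem?_eq_getElem hp]

-- core: on 0 ≤ index < n, Source B's minimum-of-next-occurrences fold equals the reference scan
theorem pvFold_eq_scan (string : String) (index : Int)
    (h0 : 0 ≤ index) (hlt : index < (string.toList.length : Int)) :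
    (PySem.List.pyRange index (string.toList.length : Int) 1).foldl (pvStepB string)
        (string.toList.length : Int) = pvScan string.toList index index := by
  set l := string.toList with hl
  set n : Int := (l.length : Int) with hn
  set r := pvScan l index index with hr
  obtain ⟨hA, hB, hC, hD⟩ := pvScan_spec l index h0 ((n - index).toNat) index rfl (le_refl _) (by omega)
  apply le_antisymm
  · -- fold ≤ r
    by_cases hrn : r = n
    · rw [hrn]
      exact pvFold_le_init string n _ index n rfl
    · have hrn' : r < n := by omega
      obtain ⟨p, hp1, hp2, hp3⟩ := hD hrn'
      have hpl : p < l.length := by omega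
      have hrl : r.toNat < l.length := by omega
      have hc2 := (pvCand_spec string (p : Int) (by omega) (by simpa using hpl)).2 r.toNat
        (by omega) (by simp only [Int.toNat_natCast]; rw [← hp3])
      obtain ⟨hpos, hle⟩ := hc2
      calc (PySem.List.pyRange index n 1).foldl (pvStepB string) n
        ≤ pvCand string (p : Int) := pvFold_le_cand string n _ index n (p : Int) rfl (by omega) (by omega) hpos
        _ ≤ r := by omega
  · -- r ≤ fold
    apply pvFold_ge string n r index _ _ index n rfl (le_refl _) hB
    intro p hpi hpn hpos
    by_contra hlt2
    push_neg at hlt2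
    -- cand p = q < r would be a repeat position inside the clean zone [index, r): contradiction
    have hp0 : 0 ≤ p := by omega
    have hppl : p.toNat < l.length := by
      -- if p.toNat ≥ length then pyGet? = none and pvCand = -1
      by_contra hge
      have : pvCand string p = -1 := by
        unfold pvCand
        rw [← hl]
        have : PySem.List.pyGet? l p = none := by
          rw [PySem.List.pyGet?_of_nonneg l hp0, List.getElem?_eq_none (by omega)]
        rw [this]
      omega
    obtain ⟨hge, hql, hqeq, _⟩ := (pvCand_spec string p hp0 hppl).1 hpos
    set q := pvCand string p with hqdef
    have hrep : pvRepAt l index.toNat q.toNat := by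
      refine ⟨p.toNat, by omega, by omega, ?_⟩
      exact hqeq.symm
    exact hC q (by omega) (by omega) hrep

-- ===== VERDICT (by name: the statement is the Claim_ definition above) =====
theorem countLongestArray_spec : Claim_equal_countLongestArray := by
  intro string index _ hpre
  unfold Spec_countLongestArray countLongestArray countLongestArray_alt
  simp only
  by_cases hge : (string.toList.length : Int) ≤ index
  · rw [if_pos hge, pvALoop]
    have : ¬ index < (string.toList.length : Int) := by omega
    rw [if_neg this]
    omega
  · rw [if_neg hge]
    push_neg at hge
    congr 1
    rw [pvLoop_eq string.toList index (((string.toList.length : Int) - index).toNat) index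
      PySem.Dict.empty rfl hpre le_rfl ?inv]
    · exact (pvFold_eq_scan string index hpre hge).symm
    case inv =>
      intro c
      unfold pvIsPresent
      rw [pvSlice_self_empty _ _ hpre]
      simp [PySem.Dict.get?_empty]
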